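-- pv_equiv track=rewrite | github.com/chebozh/coding_challenges_solutions | edabit_solutions/lvl4_lvl5/paul_cipher.py | paul_cipher
-- ===== SOURCE A (Python) =====
-- def paul_cipher(txt):
--     res, prev = [], 0
--
--     for ch in txt.upper():
--         if ch.isalpha() and prev:
--             curr = ord(ch) - 64
--             new_ch = chr(((prev + curr) % 26) + 64)
--             res.append(new_ch)
--             prev = curr
--         elif ch.isalpha() and not prev:
--             res.append(ch)
--             prev = ord(ch) - 64
--         else:
--             res.append(ch)
--
--     return ''.join(res)
-- ===== SOURCE B (Python) =====
-- def paul_cipher(txt):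
--     up = txt.upper()
--     vals = [ord(c) - 64 for c in up if c.isalpha()]
--     head = [chr(vals[0] + 64)] if vals else []
--     enc = head + [chr((p + v) % 26 + 64) for p, v in zip(vals, vals[1:])]
--     it = iter(enc)
--     return ''.join(next(it) if c.isalpha() else c for c in up)
-- ===== Notes on version B (the rewrite author's own statement) =====
-- stated objective: alternative
-- what changed: A's single streaming pass with a carried prev accumulator is replaced by three passes: extract the letter values, encode each letter from its zip-paired predecessor, then reinsert the encoded letters into the non-letter skeleton.
import Mathlib
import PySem

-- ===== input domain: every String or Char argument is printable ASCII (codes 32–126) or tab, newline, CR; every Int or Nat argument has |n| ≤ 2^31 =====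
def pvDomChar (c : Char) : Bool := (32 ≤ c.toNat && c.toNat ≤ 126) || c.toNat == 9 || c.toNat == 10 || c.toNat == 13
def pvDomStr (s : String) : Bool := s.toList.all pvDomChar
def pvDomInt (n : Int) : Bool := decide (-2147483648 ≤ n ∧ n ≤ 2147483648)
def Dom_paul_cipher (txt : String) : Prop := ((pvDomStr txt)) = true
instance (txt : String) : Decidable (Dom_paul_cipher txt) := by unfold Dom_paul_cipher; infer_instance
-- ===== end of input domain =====

-- B replaces A's streaming accumulator with three passes (extract letter values, pair each letter
-- with its predecessor, reinsert into the non-letter skeleton); objective: alternative, same cost.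

-- ===== PORT A =====
-- the loop body of A as a named step function; ord ch → ch.toNat, chr n → Char.ofNat n
-- (exact here: chr is only applied to values in 64..90, valid code points)
def pvStepA (st : List Char × Int) (ch : Char) : List Char × Int :=
  if PySem.Chars.isalpha ch && st.2 != 0 then
    (st.1 ++ [Char.ofNat ((PySem.Int.mod (st.2 + ((ch.toNat : Int) - 64)) 26) + 64).toNat],
     (ch.toNat : Int) - 64)
  else if PySem.Chars.isalpha ch && st.2 == 0 then
    (st.1 ++ [ch], (ch.toNat : Int) - 64)
  else
    (st.1 ++ [ch], st.2)

def paul_cipher (txt : String) : String :=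
  String.mk (((PySem.Chars.upper txt.toList).foldl pvStepA ([], 0)).1)

-- ===== PORT B =====
-- ''.join(next(it) if c.isalpha() else c for c in up): consume the enc queue at letter positions
-- (the empty-queue letter case is unreachable: enc has exactly one entry per letter of up)
def pvMerge : List Char → List Char → List Char
  | [], _ => []
  | c :: cs, q =>
    if PySem.Chars.isalpha c then
      match q with
      | [] => []
      | e :: q' => e :: pvMerge cs q'
    else c :: pvMerge cs q

-- head = [chr(vals[0] + 64)] if vals else []
def pvHeadB : List Int → List Char
  | [] => []
  | v :: _ => [Char.ofNat (v + 64).toNat]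

def paul_cipher_alt (txt : String) : String :=
  let up := PySem.Chars.upper txt.toList
  let vals : List Int := (up.filter PySem.Chars.isalpha).map (fun c => (c.toNat : Int) - 64)
  let enc := pvHeadB vals ++ (vals.zip vals.tail).map
      (fun pv => Char.ofNat ((PySem.Int.mod (pv.1 + pv.2) 26) + 64).toNat)
  String.mk (pvMerge up enc)

-- ===== PRECONDITION & SPEC =====
def Spec_paul_cipher (txt : String) (out : String) : Prop := out = paul_cipher_alt txt
instance (txt : String) (out : String) : Decidable (Spec_paul_cipher txt out) := by unfold Spec_paul_cipher; infer_instance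

-- ===== CLAIM (what is proved, stated in full; the proofs are below) =====
def Claim_equal_paul_cipher : Prop := ∀ (txt : String), Dom_paul_cipher txt → Spec_paul_cipher txt (paul_cipher txt)

-- ===== LEMMAS AND PROOFS =====

-- the common recursive characterisation of both programs: transform the rest of the text given
-- the value of the last letter seen (0 = none yet)
def pvG : List Char → Int → List Char
  | [], _ => []
  | c :: cs, p =>
    if PySem.Chars.isalpha c then
      (if p != 0 then Char.ofNat ((PySem.Int.mod (p + ((c.toNat : Int) - 64)) 26) + 64).toNat else c)
        :: pvG cs ((c.toNat : Int) - 64)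
    else c :: pvG cs p

-- B's enc list, generated recursively from the previous letter value
def pvEncFrom : Int → List Int → List Char
  | _, [] => []
  | p, v :: vs =>
    (if p != 0 then Char.ofNat ((PySem.Int.mod (p + v) 26) + 64).toNat
     else Char.ofNat (v + 64).toNat) :: pvEncFrom v vs

theorem pv_fold_eq (l : List Char) : ∀ (res : List Char) (p : Int),
    (l.foldl pvStepA (res, p)).1 = res ++ pvG l p := by
  induction l with
  | nil => intro res p; simp [pvG]
  | cons c cs ih =>
    intro res p
    by_cases ha : PySem.Chars.isalpha c
    · by_cases hp : p = 0
      · simp [List.foldl, pvStepA, pvG, ha, hp, ih]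
      · simp [List.foldl, pvStepA, pvG, ha, hp, ih]
    · simp [List.foldl, pvStepA, pvG, ha, ih]

theorem pv_alpha_ge (c : Char) (h : PySem.Chars.isalpha c = true) : 65 ≤ c.toNat := by
  simp [PySem.Chars.isalpha, PySem.Chars.isupper, PySem.Chars.islower, Char.le_def,
        UInt32.le_iff_toNat_le] at h
  rcases h with ⟨h1, _⟩ | ⟨h1, _⟩ <;> omega

theorem pv_merge_eq (l : List Char) : ∀ p : Int,
    pvMerge l (pvEncFrom p ((l.filter PySem.Chars.isalpha).map (fun c => (c.toNat : Int) - 64)))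
      = pvG l p := by
  induction l with
  | nil => intro p; simp [pvMerge, pvG]
  | cons c cs ih =>
    intro p
    by_cases ha : PySem.Chars.isalpha c
    · have hc : ((c.toNat : Int) - 64 + 64).toNat = c.toNat := by omega
      by_cases hp : p = 0
      · simp [pvMerge, pvG, pvEncFrom, ha, hp, ih, Char.ofNat_toNat]
      · simp [pvMerge, pvG, pvEncFrom, ha, hp, ih]
    · simp [pvMerge, pvG, ha, ih]

theorem pv_zip_enc (vs : List Int) : ∀ v : Int, v ≠ 0 → (∀ w ∈ vs, w ≠ 0) →
    ((v :: vs).zip vs).map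
        (fun pv => Char.ofNat ((PySem.Int.mod (pv.1 + pv.2) 26) + 64).toNat)
      = pvEncFrom v vs := by
  induction vs with
  | nil => intro v _ _; simp [pvEncFrom]
  | cons w ws ih =>
    intro v hv hws
    have hw : w ≠ 0 := hws w (by simp)
    rw [show ((v :: w :: ws).zip (w :: ws)) = (v, w) :: ((w :: ws).zip ws) from rfl]
    simp only [List.map_cons, pvEncFrom]
    rw [if_pos (by simpa using hv), ih w hw (fun x hx => hws x (by simp [hx]))]

theorem pv_enc_eq (vals : List Int) (h : ∀ v ∈ vals, v ≠ 0) :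
    pvHeadB vals ++
      (vals.zip vals.tail).map
        (fun pv => Char.ofNat ((PySem.Int.mod (pv.1 + pv.2) 26) + 64).toNat)
      = pvEncFrom 0 vals := by
  cases vals with
  | nil => simp [pvHeadB, pvEncFrom]
  | cons v vs =>
    have hv : v ≠ 0 := h v (by simp)
    simp only [pvHeadB, List.tail_cons, pvEncFrom]
    rw [pv_zip_enc vs v hv (fun w hw => h w (by simp [hw]))]
    simp

-- ===== VERDICT (by name: the statement is the Claim_ definition above) =====
theorem paul_cipher_spec : Claim_equal_paul_cipher := by
  intro txt _
  unfold Spec_paul_cipher paul_cipher paul_cipher_alt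
  have hvals : ∀ v ∈ ((PySem.Chars.upper txt.toList).filter PySem.Chars.isalpha).map
      (fun c => (c.toNat : Int) - 64), v ≠ 0 := by
    intro v hv
    simp only [List.mem_map, List.mem_filter] at hv
    obtain ⟨c, ⟨_, hca⟩, rfl⟩ := hv
    have := pv_alpha_ge c hca
    omega
  simp only []
  rw [pv_fold_eq, pv_enc_eq _ hvals, pv_merge_eq]
  simp
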